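-- pv_equiv track=rewrite | github.com/awslabs/mcp | src/trusted-advisor-mcp-server/awslabs/trusted_advisor_mcp_server/formatters.py | format_checks_list
-- ===== SOURCE A (Python) =====
-- from typing import Any, Dict, List, Optional
--
-- def _format_pillar(pillar: Optional[str]) -> str:
--     """Format a pillar name for display."""
--     if not pillar:
--         return 'N/A'
--     return pillar.replace('_', ' ').title()
--
-- def format_checks_list(checks: List[Dict[str, Any]]) -> str:
--     """Format a list of Trusted Advisor checks as markdown.
--
--     Args:
--         checks: List of check summaries from the API.
--
--     Returns:
--         A markdown-formatted string.
--     """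
--     if not checks:
--         return 'No Trusted Advisor checks found matching the specified filters.'
--
--     lines = [f'# Trusted Advisor Checks ({len(checks)} found)\n']
--
--     # Group by pillar
--     by_pillar: Dict[str, List[Dict[str, Any]]] = {}
--     for check in checks:
--         pillar = check.get('pillar', 'other')
--         by_pillar.setdefault(pillar, []).append(check)
--
--     for pillar in sorted(by_pillar.keys()):
--         pillar_checks = by_pillar[pillar]
--         lines.append(f'## {_format_pillar(pillar)} ({len(pillar_checks)} checks)\n')
--         for check in sorted(pillar_checks, key=lambda c: c.get('name', '')):
--             name = check.get('name', 'Unknown')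
--             description = check.get('description', '')
--             service = check.get('awsService', 'N/A')
--             lines.append(f'- **{name}**')
--             if service and service != 'N/A':
--                 lines.append(f'  - Service: `{service}`')
--             if description:
--                 # Truncate long descriptions
--                 desc = description[:200] + '...' if len(description) > 200 else description
--                 lines.append(f'  - {desc}')
--             lines.append('')
--
--     return '\n'.join(lines)
-- ===== SOURCE B (Python) =====
-- from typing import Any, Dict, List, Optional
--
--
-- def _format_pillar(pillar: Optional[str]) -> str:
--     """Format a pillar name for display."""
--     if not pillar:
--         return 'N/A'
--     return pillar.replace('_', ' ').title()
--
--
-- def _check_lines(check: Dict[str, Any]) -> List[str]: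
--     """Markdown lines for a single check."""
--     name = check.get('name', 'Unknown')
--     description = check.get('description', '')
--     service = check.get('awsService', 'N/A')
--     out = [f'- **{name}**']
--     if service and service != 'N/A':
--         out.append(f'  - Service: `{service}`')
--     if description:
--         desc = description[:200] + '...' if len(description) > 200 else description
--         out.append(f'  - {desc}')
--     out.append('')
--     return out
--
--
-- def format_checks_list(checks: List[Dict[str, Any]]) -> str:
--     """Format a list of Trusted Advisor checks as markdown.
--
--     Same output as the original, but without building an intermediate
--     dict of lists: the sorted distinct pillars are computed first and
--     each group is obtained by filtering.
--     """
--     if not checks: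
--         return 'No Trusted Advisor checks found matching the specified filters.'
--
--     lines = [f'# Trusted Advisor Checks ({len(checks)} found)\n']
--     pillars = sorted({c.get('pillar', 'other') for c in checks})
--     for pillar in pillars:
--         group = sorted(
--             [c for c in checks if c.get('pillar', 'other') == pillar],
--             key=lambda c: c.get('name', ''),
--         )
--         lines.append(f'## {_format_pillar(pillar)} ({len(group)} checks)\n')
--         for check in group:
--             lines.extend(_check_lines(check))
--
--     return '\n'.join(lines)
-- ===== Notes on version B (the rewrite author's own statement) =====
-- stated objective: alternative
-- what changed: Replaces the intermediate dict-of-lists grouping with computing the sorted distinct pillars up front and filtering the input per pillar, with per-check markdown emission factored into a helper that returns the lines for one check.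
import Mathlib
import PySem

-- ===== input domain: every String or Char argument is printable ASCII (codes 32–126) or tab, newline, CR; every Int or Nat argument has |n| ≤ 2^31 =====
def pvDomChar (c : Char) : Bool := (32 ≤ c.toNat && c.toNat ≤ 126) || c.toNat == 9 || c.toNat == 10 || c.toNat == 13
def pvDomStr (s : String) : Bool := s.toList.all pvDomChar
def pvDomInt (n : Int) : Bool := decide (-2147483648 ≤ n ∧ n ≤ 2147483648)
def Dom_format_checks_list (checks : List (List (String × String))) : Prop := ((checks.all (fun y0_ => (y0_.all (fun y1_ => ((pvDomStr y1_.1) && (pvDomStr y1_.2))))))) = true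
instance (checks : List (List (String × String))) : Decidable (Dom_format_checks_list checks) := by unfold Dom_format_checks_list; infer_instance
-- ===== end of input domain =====

-- B removes A's intermediate dict-of-lists: it sorts the distinct pillars up front and obtains each
-- group by filtering, emitting per-check lines through a helper; same output, same asymptotic cost class.


-- shared helpers (both Pythons use dict.get and the same _format_pillar)

-- dict.get(k, dflt) on the association-list encoding: first match
def getStr (check : List (String × String)) (k dflt : String) : String :=
  match check.find? (fun p => p.1 == k) with
  | some p => p.2
  | none => dflt

-- str.title() ported by hand over List Char (exact on ASCII: cased = alphabetic)
def titleChars : List Char → Bool → List Char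
  | [], _ => []
  | c :: rest, prevCased =>
    (if PySem.Chars.isalpha c then
        (if prevCased then PySem.Chars.lowerChar c else PySem.Chars.upperChar c)
      else c) :: titleChars rest (PySem.Chars.isalpha c)

def strTitle (s : String) : String := String.ofList (titleChars s.toList false)

-- _format_pillar from the Python module
def formatPillar (pillar : String) : String :=
  if pillar = "" then "N/A" else strTitle (PySem.Str.replace pillar "_" " ")

-- ===== PORT A =====
def format_checks_list (checks : List (List (String × String))) : String :=
  if checks = [] then
    "No Trusted Advisor checks found matching the specified filters."
  else
    let lines : List String :=
      ["# Trusted Advisor Checks (" ++ PySem.Int.toStr (checks.length : Int) ++ " found)\n"]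
    let byPillar : PySem.Dict String (List (List (String × String))) :=
      checks.foldl
        (fun d check => d.modify (getStr check "pillar" "other") [] (fun g => g ++ [check]))
        PySem.Dict.empty
    let lines :=
      (PySem.List.sorted byPillar.keys (fun k => k) false).foldl (fun lines pillar =>
        let pillarChecks := byPillar.getD pillar []
        let lines := lines ++
          ["## " ++ formatPillar pillar ++ " (" ++ PySem.Int.toStr (pillarChecks.length : Int) ++ " checks)\n"]
        (PySem.List.sorted pillarChecks (fun c => getStr c "name" "") false).foldl
          (fun lines check =>
            let name := getStr check "name" "Unknown"
            let description := getStr check "description" ""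
            let service := getStr check "awsService" "N/A"
            let lines := lines ++ ["- **" ++ name ++ "**"]
            let lines :=
              if service ≠ "" ∧ service ≠ "N/A" then
                lines ++ ["  - Service: `" ++ service ++ "`"]
              else lines
            let lines :=
              if description ≠ "" then
                let desc :=
                  if PySem.Str.len description > 200 then
                    PySem.Str.slice description none (some 200) ++ "..."
                  else description
                lines ++ ["  - " ++ desc]
              else lines
            lines ++ [""])
          lines)
        lines
    PySem.Str.join "\n" lines

-- ===== PORT B =====
-- _check_lines from Source B
def checkLines (check : List (String × String)) : List String :=
  let name := getStr check "name" "Unknown"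
  let description := getStr check "description" ""
  let service := getStr check "awsService" "N/A"
  ["- **" ++ name ++ "**"]
    ++ (if service ≠ "" ∧ service ≠ "N/A" then ["  - Service: `" ++ service ++ "`"] else [])
    ++ (if description ≠ "" then
          ["  - " ++
            (if PySem.Str.len description > 200 then
              PySem.Str.slice description none (some 200) ++ "..."
            else description)]
        else [])
    ++ [""]

def format_checks_list_alt (checks : List (List (String × String))) : String :=
  if checks = [] then
    "No Trusted Advisor checks found matching the specified filters."
  else
    let lines : List String :=
      ["# Trusted Advisor Checks (" ++ PySem.Int.toStr (checks.length : Int) ++ " found)\n"]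
    let pillars :=
      PySem.List.sorted
        (PySem.Set.ofList (checks.map (fun c => getStr c "pillar" "other")))
        (fun k => k) false
    let lines :=
      pillars.foldl (fun lines pillar =>
        let group :=
          PySem.List.sorted
            (checks.filter (fun c => getStr c "pillar" "other" == pillar))
            (fun c => getStr c "name" "") false
        let lines := lines ++
          ["## " ++ formatPillar pillar ++ " (" ++ PySem.Int.toStr (group.length : Int) ++ " checks)\n"]
        group.foldl (fun lines check => lines ++ checkLines check) lines)
        lines
    PySem.Str.join "\n" lines

-- ===== PRECONDITION & SPEC =====
def Spec_format_checks_list (checks : List (List (String × String))) (out : String) : Prop := out = format_checks_list_alt checks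
instance (checks : List (List (String × String))) (out : String) : Decidable (Spec_format_checks_list checks out) := by unfold Spec_format_checks_list; infer_instance

-- ===== CLAIM (what is proved, stated in full; the proofs are below) =====
def Claim_equal_format_checks_list : Prop := ∀ (checks : List (List (String × String))), Dom_format_checks_list checks → Spec_format_checks_list checks (format_checks_list checks)

-- ===== LEMMAS AND PROOFS =====

-- A's per-check emission step appends exactly B's _check_lines block
lemma emitA_eq (acc : List String) (check : List (String × String)) :
    (let name := getStr check "name" "Unknown"
     let description := getStr check "description" ""
     let service := getStr check "awsService" "N/A"
     let lines := acc ++ ["- **" ++ name ++ "**"]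
     let lines :=
       if service ≠ "" ∧ service ≠ "N/A" then
         lines ++ ["  - Service: `" ++ service ++ "`"]
       else lines
     let lines :=
       if description ≠ "" then
         let desc :=
           if PySem.Str.len description > 200 then
             PySem.Str.slice description none (some 200) ++ "..."
           else description
         lines ++ ["  - " ++ desc]
       else lines
     lines ++ [""]) = acc ++ checkLines check := by
  simp only [checkLines]
  split_ifs <;> simp

-- A's grouping dict: its value at any pillar is the filter of the input
lemma byPillar_getD (checks : List (List (String × String))) (p : String) :
    (checks.foldl
        (fun d check => d.modify (getStr check "pillar" "other") [] (fun g => g ++ [check]))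
        (PySem.Dict.empty : PySem.Dict String (List (List (String × String))))).getD p []
      = checks.filter (fun c => getStr c "pillar" "other" == p) := by
  have h := PySem.Dict.getD_foldl_modify_append
      (checks.map (fun c => (getStr c "pillar" "other", c)))
      (PySem.Dict.empty : PySem.Dict String (List (List (String × String)))) p
  rw [List.foldl_map] at h
  simpa [List.filter_map, Function.comp_def] using h

-- A's grouping dict: its key list is the ordered set of pillars (what B computes)
lemma byPillar_keys (checks : List (List (String × String))) :
    (checks.foldl
        (fun d check => d.modify (getStr check "pillar" "other") [] (fun g => g ++ [check]))
        (PySem.Dict.empty : PySem.Dict String (List (List (String × String))))).keys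
      = PySem.Set.ofList (checks.map (fun c => getStr c "pillar" "other")) := by
  have h := PySem.Dict.keys_foldl_modify_key checks (fun c => getStr c "pillar" "other")
      ([] : List (List (String × String))) (fun _ c g => g ++ [c])
      (PySem.Dict.empty : PySem.Dict String (List (List (String × String))))
  simpa [PySem.Set.update, PySem.Set.ofList_eq_foldl, PySem.Dict.keys_empty] using h

-- ===== VERDICT (by name: the statement is the Claim_ definition above) =====
theorem format_checks_list_spec : Claim_equal_format_checks_list := by
  intro checks _
  unfold Spec_format_checks_list format_checks_list format_checks_list_alt
  by_cases h : checks = []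
  · simp [h]
  · simp only [h, if_false]
    rw [byPillar_keys]
    congr 1
    apply PySem.List.foldl_congr_mem
    intro acc p _
    rw [byPillar_getD]
    rw [(PySem.List.sorted_perm
      (checks.filter (fun c => getStr c "pillar" "other" == p))
      (fun c => getStr c "name" "") false).length_eq]
    congr 1
    funext acc' c
    exact emitA_eq acc' c
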